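-- pv_equiv track=rewrite | github.com/98Rajesh/MyCompareTool | bc-lite-github-lic-pro-ready/app/three_way_merge.py | _diff3
-- ===== SOURCE A (Python) =====
-- from typing import List
--
-- CONFLICT_START = "<<<<<<< LEFT\n"
--
-- CONFLICT_MID = "=======\n"
--
-- CONFLICT_END = ">>>>>>> RIGHT\n"
--
-- def _diff3(base: List[str], left: List[str], right: List[str]) -> List[str]:
--     """
--     Very small, naive diff3-like merge.
--     """
--     out = []
--     i = j = 0
--     while i < len(left) or j < len(right):
--         l = left[i] if i < len(left) else None
--         r = right[j] if j < len(right) else None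
--         if l == r:
--             out.append(l if l is not None else "")
--             i += (i < len(left))
--             j += (j < len(right))
--         elif l is None:
--             out.append(r)
--             j += 1
--         elif r is None:
--             out.append(l)
--             i += 1
--         else:
--             out.append(CONFLICT_START)
--             out.append(l)
--             out.append(CONFLICT_MID)
--             out.append(r)
--             out.append(CONFLICT_END)
--             i += 1
--             j += 1
--     return out
-- ===== SOURCE B (Python) =====
-- from typing import List
--
-- CONFLICT_START = "<<<<<<< LEFT\n"
--
-- CONFLICT_MID = "=======\n"
--
-- CONFLICT_END = ">>>>>>> RIGHT\n"
--
-- def _diff3(base: List[str], left: List[str], right: List[str]) -> List[str]: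
--     """
--     Naive diff3-like merge, by structural recursion on the two line lists:
--     an exhausted side yields the other side's remainder, otherwise the two
--     head lines are merged (equal -> the line, different -> a conflict block)
--     in front of the merge of the tails.
--     """
--     if not left:
--         return list(right)
--     if not right:
--         return list(left)
--     rest = _diff3(base, left[1:], right[1:])
--     if left[0] == right[0]:
--         return [left[0]] + rest
--     return [CONFLICT_START, left[0], CONFLICT_MID, right[0], CONFLICT_END] + rest
-- ===== Notes on version B (the rewrite author's own statement) =====
-- stated objective: simpler
-- what changed: Replaces the two-index while loop with None sentinels by structural recursion on the two lists: base cases return the surviving side, the recursive case merges the two head lines in front of the merged tails; no indices, sentinels or length arithmetic remain.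
import Mathlib
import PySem

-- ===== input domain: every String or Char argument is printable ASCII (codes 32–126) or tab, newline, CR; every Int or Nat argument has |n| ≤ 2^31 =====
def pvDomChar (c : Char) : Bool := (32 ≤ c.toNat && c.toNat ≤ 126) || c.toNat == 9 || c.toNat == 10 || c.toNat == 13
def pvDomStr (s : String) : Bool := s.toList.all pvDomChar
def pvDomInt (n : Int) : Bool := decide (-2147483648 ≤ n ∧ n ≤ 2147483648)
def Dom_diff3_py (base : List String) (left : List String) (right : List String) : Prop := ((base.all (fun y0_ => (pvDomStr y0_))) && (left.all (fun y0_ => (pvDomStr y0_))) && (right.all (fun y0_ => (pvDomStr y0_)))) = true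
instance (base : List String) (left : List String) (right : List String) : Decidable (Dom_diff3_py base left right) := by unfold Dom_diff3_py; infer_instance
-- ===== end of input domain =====

-- B replaces A's two-index while loop with None sentinels by structural recursion
-- on the two line lists (objective: simpler).


def CONFLICT_START : String := "<<<<<<< LEFT\n"
def CONFLICT_MID : String := "=======\n"
def CONFLICT_END : String := ">>>>>>> RIGHT\n"

-- ===== PORT A =====
-- The while loop of _diff3. `left[i] if i < len(left) else None` is `left[i]?`; each
-- iteration conses the lines Python appends to `out`, in order. The loop runs at most
-- len(left)+len(right) times (each iteration advances i or j), so that is the fuel.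
def diff3Loop (left right : List String) : Nat → Nat → Nat → List String
  | _, _, 0 => []
  | i, j, fuel + 1 =>
    if i < left.length ∨ j < right.length then
      if left[i]? = right[j]? then
        ((left[i]?).getD "") :: diff3Loop left right (i + (if i < left.length then 1 else 0))
                                                     (j + (if j < right.length then 1 else 0)) fuel
      else
        match left[i]?, right[j]? with
        | none, some rv => rv :: diff3Loop left right i (j + 1) fuel
        | some lv, none => lv :: diff3Loop left right (i + 1) j fuel
        | some lv, some rv =>
            CONFLICT_START :: lv :: CONFLICT_MID :: rv :: CONFLICT_END ::
              diff3Loop left right (i + 1) (j + 1) fuel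
        | none, none => []   -- unreachable: contradicts the loop condition
    else []

def diff3_py (base : List String) (left : List String) (right : List String) : List String :=
  diff3Loop left right 0 0 (left.length + right.length)

-- ===== PORT B =====
-- Source B's structural recursion: an empty side returns the other side, otherwise the
-- merged heads are consed onto the merge of the tails.
def mergeRec : List String → List String → List String
  | [], right => right
  | left, [] => left
  | l :: ls, r :: rs =>
    let rest := mergeRec ls rs
    if l = r then l :: rest
    else CONFLICT_START :: l :: CONFLICT_MID :: r :: CONFLICT_END :: rest

def diff3_py_alt (base : List String) (left : List String) (right : List String) : List String :=
  mergeRec left right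

-- ===== PRECONDITION & SPEC =====
def Spec_diff3_py (base : List String) (left : List String) (right : List String) (out : List String) : Prop := out = diff3_py_alt base left right
instance (base : List String) (left : List String) (right : List String) (out : List String) : Decidable (Spec_diff3_py base left right out) := by unfold Spec_diff3_py; infer_instance

-- ===== CLAIM (what is proved, stated in full; the proofs are below) =====
def Claim_equal_diff3_py : Prop := ∀ (base : List String) (left : List String) (right : List String), Dom_diff3_py base left right → Spec_diff3_py base left right (diff3_py base left right)

-- ===== LEMMAS AND PROOFS =====

-- Once the left list is exhausted, A's loop copies the remaining right tail.
lemma diff3Loop_tailR (left right : List String) (i : Nat) :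
    ∀ (fuel j : Nat), left.length ≤ i → right.length - j ≤ fuel →
      diff3Loop left right i j fuel = right.drop j := by
  intro fuel
  induction fuel with
  | zero =>
      intro j _ hf
      rw [List.drop_eq_nil_of_le (by omega)]
      rfl
  | succ fuel ih =>
      intro j hi hf
      by_cases hj : j < right.length
      · rw [diff3Loop, if_pos (Or.inr hj)]
        have hl : left[i]? = none := List.getElem?_eq_none_iff.mpr hi
        have hr : right[j]? = some right[j] := List.getElem?_eq_getElem hj
        simp only [hl, hr, reduceCtorEq, reduceIte]
        rw [ih (j + 1) hi (by omega), ← List.drop_eq_getElem_cons hj]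
      · rw [diff3Loop, if_neg (by omega)]
        rw [List.drop_eq_nil_of_le (by omega)]

-- Symmetrically, once the right list is exhausted it copies the left tail.
lemma diff3Loop_tailL (left right : List String) (j : Nat) :
    ∀ (fuel i : Nat), right.length ≤ j → left.length - i ≤ fuel →
      diff3Loop left right i j fuel = left.drop i := by
  intro fuel
  induction fuel with
  | zero =>
      intro i _ hf
      rw [List.drop_eq_nil_of_le (by omega)]
      rfl
  | succ fuel ih =>
      intro i hj hf
      by_cases hi : i < left.length
      · rw [diff3Loop, if_pos (Or.inl hi)]
        have hl : left[i]? = some left[i] := List.getElem?_eq_getElem hi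
        have hr : right[j]? = none := List.getElem?_eq_none_iff.mpr hj
        simp only [hl, hr, reduceCtorEq, reduceIte]
        rw [ih (i + 1) hj (by omega), ← List.drop_eq_getElem_cons hi]
      · rw [diff3Loop, if_neg (by omega)]
        rw [List.drop_eq_nil_of_le (by omega)]

-- While both lists still have lines A's two indices advance in lockstep, so the loop
-- at position (k, k) computes exactly B's recursion on the two dropped tails.
lemma diff3Loop_eq_mergeRec (left right : List String) :
    ∀ (fuel k : Nat), left.length + right.length - 2 * k ≤ fuel →
      k ≤ min left.length right.length →
      diff3Loop left right k k fuel = mergeRec (left.drop k) (right.drop k) := by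
  intro fuel
  induction fuel with
  | zero =>
      intro k hf hk
      have h1 : left.length = k := by omega
      have h2 : right.length = k := by omega
      rw [List.drop_eq_nil_of_le h1.le, List.drop_eq_nil_of_le h2.le]
      rfl
  | succ fuel ih =>
      intro k hf hk
      by_cases hlt : k < min left.length right.length
      · have hi : k < left.length := by omega
        have hj : k < right.length := by omega
        have hl : left[k]? = some left[k] := List.getElem?_eq_getElem hi
        have hr : right[k]? = some right[k] := List.getElem?_eq_getElem hj
        rw [List.drop_eq_getElem_cons hi, List.drop_eq_getElem_cons hj, mergeRec]
        rw [diff3Loop, if_pos (Or.inl hi)]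
        by_cases heq : left[k] = right[k]
        · rw [if_pos (by rw [hl, hr, heq])]
          rw [if_pos hi, if_pos hj, ih (k + 1) (by omega) (by omega)]
          simp [heq, hl]
        · rw [if_neg (by simp [hl, hr, heq])]
          simp only [hl, hr]
          rw [ih (k + 1) (by omega) (by omega)]
          simp [heq]
      · have hk' : k = min left.length right.length := by omega
        subst hk'
        rcases Nat.le_total left.length right.length with h | h
        · rw [Nat.min_eq_left h,
              diff3Loop_tailR left right _ _ _ (le_refl _) (by omega),
              List.drop_eq_nil_of_le (le_refl left.length)]
          rfl
        · rw [Nat.min_eq_right h,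
              diff3Loop_tailL left right _ _ _ (le_refl _) (by omega),
              List.drop_eq_nil_of_le (le_refl right.length)]
          generalize left.drop right.length = t
          cases t <;> rfl

-- ===== VERDICT (by name: the statement is the Claim_ definition above) =====
theorem diff3_py_spec : Claim_equal_diff3_py := by
  intro base left right _
  unfold Spec_diff3_py diff3_py diff3_py_alt
  rw [diff3Loop_eq_mergeRec left right _ 0 (by omega) (Nat.zero_le _)]
  rfl
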